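-- pv_equiv track=rewrite | github.com/mattheqd/columns | game_mechanics.py | _shift_down_empties
-- ===== SOURCE A (Python) =====
-- def _shift_down_empties(col: list[str]) -> list[str]:
--     'shifts down the empty spaces in a column'
--     shifted = []
--     for char in col:
--         if char != '   ':
--             shifted.append(char)
--     while len(shifted) != len(col):
--         shifted.insert(0,'   ')
--     return shifted
-- ===== SOURCE B (Python) =====
-- def _shift_down_empties(col: list[str]) -> list[str]:
--     'shifts down the empty spaces in a column'
--     # stable sort by emptiness: empty cells (key False) come first, the
--     # non-empty cells keep their relative order (sorted is stable)
--     return sorted(col, key=lambda c: c != '   ')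
-- ===== Notes on version B (the rewrite author's own statement) =====
-- stated objective: idiomatic
-- what changed: Replaces the filter-then-pad-with-insert(0) construction by a single stable sort keyed on emptiness (empties sort first, stability keeps the non-empty order), which yields the identical list.
import Mathlib
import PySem

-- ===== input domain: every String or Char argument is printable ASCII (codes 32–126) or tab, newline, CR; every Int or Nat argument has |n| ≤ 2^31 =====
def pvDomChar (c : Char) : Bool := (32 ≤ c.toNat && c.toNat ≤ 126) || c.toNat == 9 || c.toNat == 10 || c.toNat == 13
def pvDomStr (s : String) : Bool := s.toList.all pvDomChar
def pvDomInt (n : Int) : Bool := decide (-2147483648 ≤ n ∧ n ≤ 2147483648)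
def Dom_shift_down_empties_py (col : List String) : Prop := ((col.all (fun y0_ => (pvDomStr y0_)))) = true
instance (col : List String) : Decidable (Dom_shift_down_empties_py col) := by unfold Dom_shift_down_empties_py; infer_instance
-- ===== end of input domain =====

-- B replaces A's filter-then-pad-with-insert(0) construction by a single stable sort keyed on emptiness (idiomatic).

-- ===== PORT A =====
-- the for-loop: shifted.append(char) for every char != '   '
def pvALoop (col : List String) (shifted : List String) : List String :=
  match col with
  | [] => shifted
  | char :: rest =>
      if char ≠ "   " then pvALoop rest (shifted ++ [char])
      else pvALoop rest shifted

-- the while-loop: insert "   " at index 0 until len(shifted) == target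
-- (the guard 'shifted.length < target' makes the recursion total; in A the filtered
--  list is never longer than col, so the Python condition '!=' coincides with '<')
def pvAWhile (target : Nat) (shifted : List String) : List String :=
  if _h : shifted.length < target then pvAWhile target ("   " :: shifted)
  else shifted
termination_by target - shifted.length
decreasing_by simp; omega

def shift_down_empties_py (col : List String) : List String :=
  let shifted := pvALoop col []
  pvAWhile col.length shifted

-- ===== PORT B =====
-- sorted(col, key=lambda c: c != '   '): stable sort, key False (empties) before True
def shift_down_empties_py_alt (col : List String) : List String :=
  PySem.List.sorted col (fun c => decide (c ≠ "   ")) false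

-- ===== PRECONDITION & SPEC =====
def Spec_shift_down_empties_py (col : List String) (out : List String) : Prop := out = shift_down_empties_py_alt col
instance (col : List String) (out : List String) : Decidable (Spec_shift_down_empties_py col out) := by unfold Spec_shift_down_empties_py; infer_instance

-- ===== CLAIM (what is proved, stated in full; the proofs are below) =====
def Claim_equal_shift_down_empties_py : Prop := ∀ (col : List String), Dom_shift_down_empties_py col → Spec_shift_down_empties_py col (shift_down_empties_py col)

-- ===== LEMMAS AND PROOFS =====
theorem pvALoop_eq_filter (col : List String) (acc : List String) :
    pvALoop col acc = acc ++ col.filter (fun c => c ≠ "   ") := by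
  induction col generalizing acc with
  | nil => simp [pvALoop]
  | cons c rest ih =>
      by_cases h : c = "   " <;> simp [pvALoop, h, ih]

theorem pvAWhile_eq_replicate (target : Nat) (s : List String) :
    pvAWhile target s = List.replicate (target - s.length) "   " ++ s := by
  by_cases h : s.length < target
  · rw [pvAWhile]
    simp only [h, dif_pos]
    rw [pvAWhile_eq_replicate target ("   " :: s)]
    have : target - s.length = (target - ("   " :: s).length) + 1 := by simp; omega
    rw [this, List.replicate_succ']
    simp
  · rw [pvAWhile]
    simp only [h, dif_neg, not_false_iff]
    have : target - s.length = 0 := by omega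
    simp [this]
termination_by target - s.length
decreasing_by simp; omega

-- the comparator of B's sort, named for the lemmas below
def pvBefore (a b : String) : Bool :=
  decide ((decide (a ≠ "   ")) < (decide (b ≠ "   ")))

-- inserting into a "blanks ++ non-blanks" list keeps that shape
theorem insertBy_blank (k : Nat) (filled : List String)
    (hf : ∀ y ∈ filled, y ≠ "   ") :
    PySem.List.insertBy pvBefore "   " (List.replicate k "   " ++ filled) =
      List.replicate (k + 1) "   " ++ filled := by
  induction k with
  | zero =>
      cases filled with
      | nil => simp [PySem.List.insertBy]
      | cons y ys =>
          have hy : y ≠ "   " := hf y (by simp)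
          simp [PySem.List.insertBy, pvBefore, hy]
  | succ n ih =>
      rw [List.replicate_succ, List.cons_append]
      have hstep : PySem.List.insertBy pvBefore "   " ("   " :: (List.replicate n "   " ++ filled))
          = "   " :: PySem.List.insertBy pvBefore "   " (List.replicate n "   " ++ filled) := by
        simp [PySem.List.insertBy, pvBefore]
      rw [hstep, ih]
      simp [List.replicate_succ]

theorem insertBy_shape (k : Nat) (filled : List String)
    (hf : ∀ y ∈ filled, y ≠ "   ") (x : String) :
    PySem.List.insertBy pvBefore x (List.replicate k "   " ++ filled) =
      if x = "   " then List.replicate (k + 1) "   " ++ filled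
      else List.replicate k "   " ++ filled ++ [x] := by
  by_cases hx : x = "   "
  · subst hx
    rw [if_pos rfl]
    exact insertBy_blank k filled hf
  · rw [if_neg hx]
    rw [PySem.List.insertBy_of_forall_not_before pvBefore x
      (List.replicate k "   " ++ filled) (by intro y _; simp [pvBefore, hx])]

theorem foldl_insertBy_shape (col : List String) (k : Nat) (filled : List String)
    (hf : ∀ y ∈ filled, y ≠ "   ") :
    col.foldl (fun acc x => PySem.List.insertBy pvBefore x acc)
        (List.replicate k "   " ++ filled) =
      List.replicate (k + (col.countP (fun c => c = "   "))) "   " ++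
        (filled ++ col.filter (fun c => c ≠ "   ")) := by
  induction col generalizing k filled with
  | nil => simp
  | cons c rest ih =>
      simp only [List.foldl_cons]
      rw [insertBy_shape k filled hf c]
      by_cases hc : c = "   "
      · rw [if_pos hc, ih (k + 1) filled hf]
        simp [hc]
        omega
      · rw [if_neg hc]
        have : List.replicate k "   " ++ filled ++ [c] =
            List.replicate k "   " ++ (filled ++ [c]) := by simp
        rw [this, ih k (filled ++ [c]) ?_]
        · simp [hc]
        · intro y hy
          rcases List.mem_append.mp hy with h | h
          · exact hf y h
          · simp at h; subst h; exact hc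

-- ===== VERDICT (by name: the statement is the Claim_ definition above) =====
theorem shift_down_empties_py_spec : Claim_equal_shift_down_empties_py := by
  intro col _
  unfold Spec_shift_down_empties_py shift_down_empties_py shift_down_empties_py_alt
  rw [PySem.List.sorted_eq_foldl_insertBy]
  have hB := foldl_insertBy_shape col 0 [] (by simp)
  simp only [List.replicate_zero, List.nil_append, List.append_nil, Nat.zero_add] at hB
  have : (fun (a b : String) => decide ((decide (a ≠ "   ")) < (decide (b ≠ "   ")))) = pvBefore := rfl
  rw [this, hB]
  rw [pvALoop_eq_filter, pvAWhile_eq_replicate]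
  simp only [List.nil_append]
  have h1 : (col.filter (fun c => decide (c ≠ "   "))).length
      = col.countP (fun c => !decide (c = "   ")) := by
    rw [← List.countP_eq_length_filter]
    simp only [decide_not]
  have h2 := List.length_eq_countP_add_countP (p := fun c : String => decide (c = "   ")) (l := col)
  simp only [decide_not, Bool.decide_eq_true] at h2
  congr 2
  rw [h1]
  omega
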